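-- pv_equiv track=rewrite | github.com/valvarezgi/holbertonschool-interview | 0x13-count_it/0-count.py | generate_dicts
-- ===== SOURCE A (Python) =====
-- def generate_dicts(word_list):
--     """Generates the two dictionaries
--     Args:
--         word_list ([List]): list of words about subreddit
--     """
--     count = {k: 0 for k in word_list}
--     dup = {}
--     for k in word_list:
--         if k not in dup:
--             dup[k] = 0
--         dup[k] += 1
--     return (count, dup)
-- ===== SOURCE B (Python) =====
-- def generate_dicts(word_list):
--     """One pass over first occurrences only: when a key is seen for the
--     first time, record 0 in count and its total via word_list.count(k) in dup,
--     instead of accumulating counts incrementally."""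
--     count = {}
--     dup = {}
--     for k in word_list:
--         if k not in count:
--             count[k] = 0
--             dup[k] = word_list.count(k)
--     return (count, dup)
-- ===== Notes on version B (the rewrite author's own statement) =====
-- stated objective: alternative
-- what changed: B replaces A's incremental per-element count accumulation (dup[k] += 1 on every element) by a first-occurrence pass: each distinct key is handled once, with its total obtained by an inner word_list.count(k) scan, and count is filled in the same pass instead of a separate comprehension.
import Mathlib
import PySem

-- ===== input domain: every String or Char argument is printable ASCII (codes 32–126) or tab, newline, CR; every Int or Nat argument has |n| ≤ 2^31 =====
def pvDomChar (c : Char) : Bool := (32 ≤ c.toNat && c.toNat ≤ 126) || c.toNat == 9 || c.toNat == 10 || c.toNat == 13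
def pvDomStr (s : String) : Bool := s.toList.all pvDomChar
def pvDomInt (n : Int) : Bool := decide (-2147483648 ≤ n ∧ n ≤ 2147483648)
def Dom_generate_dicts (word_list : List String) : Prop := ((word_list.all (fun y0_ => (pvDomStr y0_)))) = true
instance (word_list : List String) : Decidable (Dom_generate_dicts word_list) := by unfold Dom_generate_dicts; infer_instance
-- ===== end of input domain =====

-- B processes each distinct key once (at its first occurrence), getting its total
-- via a word_list.count scan, instead of A's incremental += 1 over every element;
-- alternative decomposition, same return value.


-- ===== PORT A =====
def generate_dicts (word_list : List String) : (List (String × Int)) × (List (String × Int)) :=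
  -- count = {k: 0 for k in word_list}
  let count : PySem.Dict String Int :=
    word_list.foldl (fun d k => d.insert k 0) PySem.Dict.empty
  -- dup = {}; for k in word_list: if k not in dup: dup[k] = 0; dup[k] += 1
  let dup : PySem.Dict String Int :=
    word_list.foldl
      (fun d k =>
        let d := if d.contains k then d else d.insert k 0
        d.modify k 0 (· + 1))
      PySem.Dict.empty
  (count.items, dup.items)

-- ===== PORT B =====
def generate_dicts_alt (word_list : List String) : (List (String × Int)) × (List (String × Int)) :=
  -- count = {}; dup = {}
  -- for k in word_list: if k not in count: count[k] = 0; dup[k] = word_list.count(k)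
  let cd : PySem.Dict String Int × PySem.Dict String Int :=
    word_list.foldl
      (fun cd k =>
        if cd.1.contains k then cd
        else (cd.1.insert k 0, cd.2.insert k (PySem.List.count word_list k)))
      (PySem.Dict.empty, PySem.Dict.empty)
  (cd.1.items, cd.2.items)

-- ===== PRECONDITION & SPEC =====
def Spec_generate_dicts (word_list : List String) (out : (List (String × Int)) × (List (String × Int))) : Prop := out = generate_dicts_alt word_list
instance (word_list : List String) (out : (List (String × Int)) × (List (String × Int))) : Decidable (Spec_generate_dicts word_list out) := by unfold Spec_generate_dicts; infer_instance

-- ===== CLAIM (what is proved, stated in full; the proofs are below) =====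
def Claim_equal_generate_dicts : Prop := ∀ (word_list : List String), Dom_generate_dicts word_list → Spec_generate_dicts word_list (generate_dicts word_list)

-- ===== LEMMAS AND PROOFS =====

-- A's per-element dup step equals the Counter step 'insert k (getD k 0 + 1)'.
theorem dup_step_eq (d : PySem.Dict String Int) (k : String) :
    (let d' := if d.contains k then d else d.insert k 0
     d'.modify k 0 (· + 1)) = d.insert k (d.getD k 0 + 1) := by
  by_cases h : d.contains k
  · simp [h, PySem.Dict.modify]
  · have h' : d.contains k = false := by simpa using h
    simp only [h', Bool.false_eq_true, if_false, PySem.Dict.modify,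
      PySem.Dict.getD_insert_self, PySem.Dict.insert_insert_self,
      PySem.Dict.getD_of_not_contains d 0 h']

theorem contains_map_mk (xs : List String) (f : String → Int) (x : String) :
    (PySem.Dict.mk ((PySem.Set.ofList xs).map (fun k => (k, f k)))).contains x
      = decide (x ∈ PySem.Set.ofList xs) := by
  simp only [PySem.Dict.contains_mk, List.any_map, Function.comp_def]
  rw [Bool.eq_iff_iff]
  constructor
  · intro h
    rcases List.any_eq_true.mp h with ⟨a, ha, hax⟩
    exact decide_eq_true (beq_iff_eq.mp hax ▸ ha)
  · intro h
    exact List.any_eq_true.mpr ⟨x, of_decide_eq_true h, beq_self_eq_true x⟩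

-- B's fold over a processed prefix xs (wl fixed) yields the two dicts in closed form.
theorem alt_foldl_closed (wl : List String) (xs : List String) :
    xs.foldl
      (fun cd k =>
        if cd.1.contains k then cd
        else (cd.1.insert k 0, cd.2.insert k (PySem.List.count wl k)))
      ((PySem.Dict.empty, PySem.Dict.empty) : PySem.Dict String Int × PySem.Dict String Int)
      = (PySem.Dict.mk ((PySem.Set.ofList xs).map (fun k => (k, (0 : Int)))),
         PySem.Dict.mk ((PySem.Set.ofList xs).map (fun k => (k, (PySem.List.count wl k : Int))))) := by
  induction xs using List.reverseRecOn with
  | nil => rfl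
  | append_singleton xs x ih =>
    rw [List.foldl_append, List.foldl_cons, List.foldl_nil, ih,
      PySem.Set.ofList_append_singleton]
    by_cases h : x ∈ PySem.Set.ofList xs
    · rw [PySem.Set.add_of_mem h, contains_map_mk, decide_eq_true h, if_pos rfl]
    · rw [PySem.Set.add_of_not_mem h, contains_map_mk, decide_eq_false h]
      simp only [Bool.false_eq_true, if_false]
      refine Prod.ext ?_ ?_ <;>
        apply PySem.Dict.ext <;>
        rw [PySem.Dict.items_insert_of_not_contains _ _
          (by rw [contains_map_mk]; exact decide_eq_false h)] <;>
        simp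

-- A's count dict in the same closed form.
theorem foldl_insert_zero (xs : List String) :
    xs.foldl (fun d k => d.insert k 0) (PySem.Dict.empty : PySem.Dict String Int)
      = PySem.Dict.mk ((PySem.Set.ofList xs).map (fun k => (k, (0 : Int)))) := by
  induction xs using List.reverseRecOn with
  | nil => rfl
  | append_singleton xs x ih =>
    rw [List.foldl_append, List.foldl_cons, List.foldl_nil, ih,
      PySem.Set.ofList_append_singleton]
    by_cases h : x ∈ PySem.Set.ofList xs
    · rw [PySem.Set.add_of_mem h]
      apply PySem.Dict.ext
      rw [PySem.Dict.items_insert_of_contains _ _ (by rw [contains_map_mk]; exact decide_eq_true h)]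
      show List.map _ ((PySem.Set.ofList xs).map _) = _
      rw [List.map_map]
      apply List.map_congr_left
      intro a _
      simp only [Function.comp]
      by_cases hax : a = x
      · subst hax; simp
      · simp [hax]
    · rw [PySem.Set.add_of_not_mem h]
      apply PySem.Dict.ext
      rw [PySem.Dict.items_insert_of_not_contains _ _ (by rw [contains_map_mk]; exact decide_eq_false h)]
      simp

-- ===== VERDICT (by name: the statement is the Claim_ definition above) =====
theorem generate_dicts_spec : Claim_equal_generate_dicts := by
  intro wl _
  unfold Spec_generate_dicts
  simp only [generate_dicts, generate_dicts_alt]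
  rw [alt_foldl_closed]
  have hdup :
      wl.foldl
        (fun d k =>
          let d' := if d.contains k then d else d.insert k 0
          d'.modify k 0 (· + 1)) (PySem.Dict.empty : PySem.Dict String Int)
        = PySem.Dict.counter wl := by
    rw [show (fun (d : PySem.Dict String Int) k =>
          let d' := if d.contains k then d else d.insert k 0
          d'.modify k 0 (· + 1)) = fun d k => d.insert k (d.getD k 0 + 1) from
        funext fun d => funext fun k => dup_step_eq d k]
    exact PySem.Dict.foldl_insert_getD_add_one_eq_counter wl
  rw [hdup, foldl_insert_zero]
  refine Prod.ext rfl ?_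
  show (PySem.Dict.counter wl).items = _
  rw [PySem.Dict.items_counter]
  simp [PySem.List.count_eq]
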